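-- pv_equiv track=rewrite | github.com/Ibno-coder/Arabic_Word_Segmentation | TpPython/Training.py | buildWords_4Seg
-- ===== SOURCE A (Python) =====
-- def buildWords_4Seg(src, ref, pred):
--     words = []
--     rtags = []
--     ptags = []
--     l = 0
--     for word, tag in zip(src, ref):
--         words.append(''.join(word))
--         rtags.append(''.join(tag))
--         ptags.append(''.join(pred[l:l+len(word)]))
--         l += len(word)
--     return words, rtags, ptags
-- ===== SOURCE B (Python) =====
-- def buildWords_4Seg(src, ref, pred):
--     if not src or not ref:
--         return [], [], []
--     w, t = src[0], ref[0]
--     head = pred[:len(w)]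
--     words, rtags, ptags = buildWords_4Seg(src[1:], ref[1:], pred[len(w):])
--     return ([''.join(w)] + words,
--             [''.join(t)] + rtags,
--             [''.join(head)] + ptags)
-- ===== Notes on version B (the rewrite author's own statement) =====
-- stated objective: alternative
-- what changed: Replaces the single imperative loop with a running integer offset and pred[l:l+n] index slicing by structural recursion carrying no indices at all: each step splits pred itself into a head of len(word) items and a tail, recursing on the tails of src, ref and pred and consing the three results front-wise; it trades speed for this (the tail slices re-copy pred, making B quadratic in len(pred)).
import Mathlib
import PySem

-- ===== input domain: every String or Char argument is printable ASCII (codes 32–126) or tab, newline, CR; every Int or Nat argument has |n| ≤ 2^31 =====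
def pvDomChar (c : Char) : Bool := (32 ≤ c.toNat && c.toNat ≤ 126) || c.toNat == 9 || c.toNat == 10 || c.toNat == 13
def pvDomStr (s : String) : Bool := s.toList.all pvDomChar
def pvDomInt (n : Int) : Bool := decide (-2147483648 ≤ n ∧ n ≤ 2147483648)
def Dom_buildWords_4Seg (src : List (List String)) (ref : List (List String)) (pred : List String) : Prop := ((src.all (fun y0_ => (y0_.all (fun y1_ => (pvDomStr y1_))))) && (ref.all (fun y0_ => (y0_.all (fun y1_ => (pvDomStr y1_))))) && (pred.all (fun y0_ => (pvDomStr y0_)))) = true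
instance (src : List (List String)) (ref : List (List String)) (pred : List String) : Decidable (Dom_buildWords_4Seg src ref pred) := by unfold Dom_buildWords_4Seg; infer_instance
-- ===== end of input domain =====

-- B replaces the running-offset loop with index slicing by structural recursion that splits pred itself (head of len(word) items, recurse on the tails), no index arithmetic (objective: alternative decomposition; slower on large pred since the tail slices copy it).


-- ===== PORT A =====
-- the 'for word, tag in zip(src, ref)' loop, state (words, rtags, ptags, l)
def buildWords_4SegLoop (pred : List String) (pairs : List (List String × List String))
    (words rtags ptags : List String) (l : Int) : List String × List String × List String :=
  match pairs with
  | [] => (words, rtags, ptags)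
  | (word, tag) :: rest =>
      buildWords_4SegLoop pred rest
        (words ++ [PySem.Str.join "" word])
        (rtags ++ [PySem.Str.join "" tag])
        (ptags ++ [PySem.Str.join "" (PySem.List.slice pred (some l) (some (l + (word.length : Int))))])
        (l + (word.length : Int))

def buildWords_4Seg (src : List (List String)) (ref : List (List String)) (pred : List String) : List String × List String × List String :=
  buildWords_4SegLoop pred (List.zip src ref) [] [] [] 0

-- ===== PORT B =====
-- structural recursion: split pred into head (len(word) items) and tail, recurse on the tails
def buildWords_4Seg_alt (src : List (List String)) (ref : List (List String)) (pred : List String) : List String × List String × List String :=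
  match src, ref with
  | [], _ => ([], [], [])
  | _ :: _, [] => ([], [], [])
  | w :: ss, t :: rs =>
      let head := PySem.List.slice pred none (some (w.length : Int))
      let rest := buildWords_4Seg_alt ss rs (PySem.List.slice pred (some (w.length : Int)) none)
      (PySem.Str.join "" w :: rest.1,
       PySem.Str.join "" t :: rest.2.1,
       PySem.Str.join "" head :: rest.2.2)

-- ===== PRECONDITION & SPEC =====
def Spec_buildWords_4Seg (src : List (List String)) (ref : List (List String)) (pred : List String) (out : List String × List String × List String) : Prop := out = buildWords_4Seg_alt src ref pred
instance (src : List (List String)) (ref : List (List String)) (pred : List String) (out : List String × List String × List String) : Decidable (Spec_buildWords_4Seg src ref pred out) := by unfold Spec_buildWords_4Seg; infer_instance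

-- ===== CLAIM =====
def Claim_equal_buildWords_4Seg : Prop := ∀ (src : List (List String)) (ref : List (List String)) (pred : List String), Dom_buildWords_4Seg src ref pred → Spec_buildWords_4Seg src ref pred (buildWords_4Seg src ref pred)

-- ===== LEMMAS AND PROOFS =====
theorem pvLoopEqAlt (src ref : List (List String)) (pred : List String)
    (ws rs ps : List String) (l : Nat) :
    buildWords_4SegLoop pred (List.zip src ref) ws rs ps (l : Int)
      = ((ws ++ (buildWords_4Seg_alt src ref (pred.drop l)).1,
          rs ++ (buildWords_4Seg_alt src ref (pred.drop l)).2.1,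
          ps ++ (buildWords_4Seg_alt src ref (pred.drop l)).2.2)) := by
  induction src generalizing ref ws rs ps l with
  | nil => simp [buildWords_4SegLoop, buildWords_4Seg_alt]
  | cons w ss ih =>
      cases ref with
      | nil => simp [buildWords_4SegLoop, buildWords_4Seg_alt]
      | cons t rs' =>
          have hcast : (l : Int) + (w.length : Int) = ((l + w.length : Nat) : Int) := by push_cast; ring
          simp only [List.zip_cons_cons, buildWords_4SegLoop, hcast]
          rw [ih]
          simp [buildWords_4Seg_alt, PySem.List.slice_natCast_add, PySem.List.slice_to_natCast,
            PySem.List.slice_from_natCast, List.drop_drop, List.append_assoc]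

-- ===== VERDICT =====
theorem buildWords_4Seg_spec : Claim_equal_buildWords_4Seg := by
  intro src ref pred _
  unfold Spec_buildWords_4Seg buildWords_4Seg
  have := pvLoopEqAlt src ref pred [] [] [] 0
  simpa using this
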